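-- pv_equiv track=rewrite | github.com/darjoo/AdventOfCode | 2023/Day 3/Part 2.py | BuildNumbers
-- ===== SOURCE A (Python) =====
-- def BuildNumbers(input: list[str]) -> list[int]:
--     cur_numbers = []
--     num, p1, p2 = 0, -1, -1
--     for idx, c in enumerate(input):
--         if c.isnumeric():
--             num = (num * 10) + int(c)
--             if p1 == -1:
--                 p1 = idx
--                 p2 = idx+1
--             else:
--                 p2 = idx+1
--         else:
--             for _ in range(p1, p2):
--                 cur_numbers.append(num)
--             cur_numbers.append(0 if c == '.' else -1)
--             num, p1, p2 = 0, -1, -1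
--
--     if p1 != -1:
--         for _ in range(p1, p2):
--             cur_numbers.append(num)
--
--     return cur_numbers
-- ===== SOURCE B (Python) =====
-- def BuildNumbers(input: list[str]) -> list[int]:
--     # pass 1 (left to right): value of the digit-run prefix ending at each position
--     v = []
--     prev = 0
--     for c in input:
--         prev = prev * 10 + int(c) if c.isnumeric() else 0
--         v.append(prev)
--     # pass 2 (right to left): propagate each run's final value back over its run
--     out = []
--     nxt_numeric = False
--     run = 0
--     for c, x in zip(reversed(input), reversed(v)):
--         if c.isnumeric():
--             if not nxt_numeric:
--                 run = x
--             out.append(run)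
--             nxt_numeric = True
--         else:
--             out.append(0 if c == '.' else -1)
--             nxt_numeric = False
--     out.reverse()
--     return out
-- ===== Notes on version B (the rewrite author's own statement) =====
-- stated objective: alternative
-- what changed: Replaces A's single-pass state machine with span tracking (num, p1, p2, trailing flush) by a two-pass dynamic program: a forward pass computing the value of the digit-run prefix ending at each position, then a backward pass that propagates each run's final value over its positions and maps non-numeric elements to 0/-1.
import Mathlib
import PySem

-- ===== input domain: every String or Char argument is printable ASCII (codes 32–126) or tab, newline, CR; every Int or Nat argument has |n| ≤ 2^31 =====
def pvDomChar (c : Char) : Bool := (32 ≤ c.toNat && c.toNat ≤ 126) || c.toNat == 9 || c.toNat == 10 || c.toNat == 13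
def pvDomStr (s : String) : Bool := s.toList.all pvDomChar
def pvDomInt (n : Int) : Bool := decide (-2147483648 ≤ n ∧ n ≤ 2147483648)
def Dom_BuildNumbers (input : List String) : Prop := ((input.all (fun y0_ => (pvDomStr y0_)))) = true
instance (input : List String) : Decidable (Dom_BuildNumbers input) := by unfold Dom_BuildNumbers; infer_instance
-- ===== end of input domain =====

-- B replaces A's single-pass state machine (running num, p1/p2 span, trailing flush) with a
-- two-pass dynamic program: forward prefix values, then backward propagation of each run's
-- final value (alternative decomposition, same cost).


-- ===== PORT A =====
-- c.isnumeric() is ported as PySem.Str.strIsdigit (exact on the ASCII domain, where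
-- isnumeric = isdigit); int(c) as PySem.Int.ofStr? with default 0 (under strIsdigit c the
-- parse always succeeds, so the default is never used); 'for _ in range(p1, p2)' appending
-- num is List.replicate (p2 - p1).toNat num (range(a,b) has max(b-a,0) elements).
def pvStep (a : Int) (c : String) : Int := a * 10 + (PySem.Int.ofStr? c).getD 0

def pvLoopA : List String → Int → List Int → Int → Int → Int → List Int
  | [], _, acc, num, p1, p2 =>
      if p1 ≠ -1 then acc ++ List.replicate (p2 - p1).toNat num else acc
  | c :: rest, idx, acc, num, p1, _p2 =>
      if PySem.Str.strIsdigit c then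
        let num' := pvStep num c
        if p1 = -1 then pvLoopA rest (idx + 1) acc num' idx (idx + 1)
        else pvLoopA rest (idx + 1) acc num' p1 (idx + 1)
      else
        pvLoopA rest (idx + 1)
          (acc ++ List.replicate (_p2 - p1).toNat num ++ [if c = "." then (0 : Int) else -1])
          0 (-1) (-1)

def BuildNumbers (input : List String) : List Int :=
  pvLoopA input 0 [] 0 (-1) (-1)

-- ===== PORT B =====
-- Source B's pass 1 (`prev = prev*10 + int(c) if c.isnumeric() else 0`, appending to v):
def pvFwdStep (prev : Int) (c : String) : Int :=
  if PySem.Str.strIsdigit c then prev * 10 + (PySem.Int.ofStr? c).getD 0 else 0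

def pvFwd : List String → Int → List Int
  | [], _ => []
  | c :: rest, prev =>
      let p := pvFwdStep prev c
      p :: pvFwd rest p

-- Source B's pass 2 loop body: state is (nxt_numeric, run), each element emits one output value.
def pvBStep (s : Bool × Int) (e : String × Int) : (Bool × Int) × Int :=
  if PySem.Str.strIsdigit e.1 then
    let run := if s.1 then s.2 else e.2
    ((true, run), run)
  else ((false, s.2), if e.1 = "." then (0 : Int) else -1)

def pvBwd : List (String × Int) → (Bool × Int) → List Int
  | [], _ => []
  | e :: rest, s => (pvBStep s e).2 :: pvBwd rest (pvBStep s e).1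

-- zip(reversed(input), reversed(v)), then the final out.reverse()
def BuildNumbers_alt (input : List String) : List Int :=
  let v := pvFwd input 0
  (pvBwd (input.reverse.zip v.reverse) (false, 0)).reverse

-- ===== PRECONDITION & SPEC =====
def Spec_BuildNumbers (input : List String) (out : List Int) : Prop := out = BuildNumbers_alt input
instance (input : List String) (out : List Int) : Decidable (Spec_BuildNumbers input out) := by unfold Spec_BuildNumbers; infer_instance

-- ===== CLAIM (what is proved, stated in full; the proofs are below) =====
def Claim_equal_BuildNumbers : Prop := ∀ (input : List String), Dom_BuildNumbers input → Spec_BuildNumbers input (BuildNumbers input)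

-- ===== LEMMAS AND PROOFS =====

-- maximal-run decomposition shared by both sides of the proof
def pvTakeRun (k : Bool) : List String → List String × List String
  | [] => ([], [])
  | c :: rest =>
      if PySem.Str.strIsdigit c = k then
        let p := pvTakeRun k rest
        (c :: p.1, p.2)
      else ([], c :: rest)

theorem pvTakeRun_snd_length (k : Bool) (l : List String) :
    (pvTakeRun k l).2.length ≤ l.length := by
  induction l with
  | nil => simp [pvTakeRun]
  | cons c rest ih =>
      simp only [pvTakeRun]
      split
      · simpa using Nat.le_succ_of_le ih
      · simp

def pvGroupRuns : List String → List (Bool × List String)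
  | [] => []
  | c :: rest =>
      let k := PySem.Str.strIsdigit c
      let p := pvTakeRun k rest
      (k, c :: p.1) :: pvGroupRuns p.2
termination_by l => l.length
decreasing_by
  exact Nat.lt_succ_of_le (pvTakeRun_snd_length _ _)

def pvGVal (g : Bool × List String) : List Int :=
  if g.1 then List.replicate g.2.length (g.2.foldl pvStep 0)
  else g.2.map (fun c => if c = "." then (0 : Int) else -1)

theorem pvTakeRun_append (k : Bool) (l : List String) :
    (pvTakeRun k l).1 ++ (pvTakeRun k l).2 = l := by
  induction l with
  | nil => simp [pvTakeRun]
  | cons c rest ih =>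
      simp only [pvTakeRun]
      by_cases hc : PySem.Str.strIsdigit c = k
      · rw [if_pos hc]; simpa using ih
      · rw [if_neg hc]; rfl

theorem pvTakeRun_mem (k : Bool) (l : List String) :
    ∀ x ∈ (pvTakeRun k l).1, PySem.Str.strIsdigit x = k := by
  induction l with
  | nil => simp [pvTakeRun]
  | cons c rest ih =>
      simp only [pvTakeRun]
      by_cases hc : PySem.Str.strIsdigit c = k
      · rw [if_pos hc]
        intro x hx
        rcases List.mem_cons.mp hx with h | h
        · rw [h]; exact hc
        · exact ih x h
      · rw [if_neg hc]; simp

theorem pvTakeRun_head (k : Bool) (l : List String) :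
    ∀ c r', (pvTakeRun k l).2 = c :: r' → ¬ PySem.Str.strIsdigit c = k := by
  induction l with
  | nil => simp [pvTakeRun]
  | cons d rest ih =>
      simp only [pvTakeRun]
      by_cases hd : PySem.Str.strIsdigit d = k
      · rw [if_pos hd]; exact ih
      · rw [if_neg hd]
        intro c r' h
        injection h with h1 _
        rw [← h1]; exact hd

-- ===== A-side: the state machine emits the grouped runs =====

theorem pvLoopA_nondigit_run (g : List String)
    (hg : ∀ x ∈ g, PySem.Str.strIsdigit x = false) :
    ∀ (r : List String) (idx : Int) (acc : List Int),
      pvLoopA (g ++ r) idx acc 0 (-1) (-1) =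
      pvLoopA r (idx + g.length) (acc ++ g.map (fun c => if c = "." then (0 : Int) else -1)) 0 (-1) (-1) := by
  induction g with
  | nil => intro r idx acc; simp
  | cons c g ih =>
      intro r idx acc
      have hc : PySem.Str.strIsdigit c = false := hg c (by simp)
      simp only [List.cons_append, pvLoopA, hc, Bool.false_eq_true, if_false]
      rw [ih (fun x hx => hg x (by simp [hx])) r (idx + 1)]
      have h1 : idx + 1 + (g.length : Int) = idx + ((c :: g).length : Int) := by
        push_cast [List.length_cons]; ring
      rw [h1]
      congr 1
      simp

theorem pvLoopA_digit_run (g : List String)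
    (hg : ∀ x ∈ g, PySem.Str.strIsdigit x = true) :
    ∀ (r : List String),
      (∀ c r', r = c :: r' → PySem.Str.strIsdigit c = false) →
      ∀ (idx p1 : Int) (acc : List Int) (num : Int), 0 ≤ p1 → p1 < idx →
      pvLoopA (g ++ r) idx acc num p1 idx =
        pvLoopA r (idx + g.length)
          (acc ++ List.replicate (idx + g.length - p1).toNat (g.foldl pvStep num))
          0 (-1) (-1) := by
  induction g with
  | nil =>
      intro r hr idx p1 acc num h0 hlt
      match r with
      | [] =>
          have hne : ¬ (p1 = -1) := by omega
          simp only [List.nil_append, pvLoopA]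
          simp
          omega
      | c :: r' =>
          have hc : PySem.Str.strIsdigit c = false := hr c r' rfl
          simp only [List.nil_append, pvLoopA, hc, Bool.false_eq_true, if_false]
          simp
  | cons c g ih =>
      intro r hr idx p1 acc num h0 hlt
      have hc : PySem.Str.strIsdigit c = true := hg c (by simp)
      have hp1 : ¬ (p1 = -1) := by omega
      simp only [List.cons_append, pvLoopA, hc, if_pos, hp1, if_false]
      rw [ih (fun x hx => hg x (by simp [hx])) r hr (idx + 1) p1 acc (pvStep num c) h0 (by omega)]
      have h1 : idx + 1 + (g.length : Int) = idx + ((c :: g).length : Int) := by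
        push_cast [List.length_cons]; ring
      rw [h1]
      simp

theorem pvLoopA_groups :
    ∀ (n : Nat) (l : List String), l.length ≤ n →
      ∀ (idx : Int) (acc : List Int), 0 ≤ idx →
        pvLoopA l idx acc 0 (-1) (-1) = acc ++ (pvGroupRuns l).flatMap pvGVal := by
  intro n
  induction n with
  | zero =>
      intro l hl idx acc _
      have : l = [] := List.length_eq_zero_iff.mp (Nat.le_zero.mp hl)
      subst this
      simp [pvLoopA, pvGroupRuns]
  | succ n ih =>
      intro l hl idx acc hidx
      match l with
      | [] => simp [pvLoopA, pvGroupRuns]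
      | c :: rest =>
          have hrest : rest.length ≤ n := by simpa using hl
          by_cases hc : PySem.Str.strIsdigit c = true
          · have hsplit := pvTakeRun_append true rest
            have hmem := pvTakeRun_mem true rest
            have hhead := pvTakeRun_head true rest
            have hr2 : (pvTakeRun true rest).2.length ≤ n :=
              le_trans (pvTakeRun_snd_length true rest) hrest
            simp only [pvLoopA, hc, if_pos]
            rw [← hsplit]
            rw [pvLoopA_digit_run (pvTakeRun true rest).1 hmem (pvTakeRun true rest).2
                  (fun d r' h => by simpa using hhead d r' h)
                  (idx + 1) idx acc (pvStep 0 c) hidx (by omega)]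
            rw [ih (pvTakeRun true rest).2 hr2 _ _ (by positivity)]
            simp only [pvGroupRuns, hc, List.flatMap_cons, ← List.append_assoc]
            rw [hsplit]
            congr 2
            simp only [pvGVal, List.length_cons, List.foldl_cons]
            congr 1
            omega
          · have hcf : PySem.Str.strIsdigit c = false := by
              cases h : PySem.Str.strIsdigit c
              · rfl
              · exact absurd h hc
            have hsplit := pvTakeRun_append false rest
            have hmem := pvTakeRun_mem false rest
            have hr2 : (pvTakeRun false rest).2.length ≤ n :=
              le_trans (pvTakeRun_snd_length false rest) hrest
            simp only [pvLoopA, hcf, Bool.false_eq_true, if_false]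
            rw [← hsplit]
            have hstep := pvLoopA_nondigit_run (pvTakeRun false rest).1 hmem
              (pvTakeRun false rest).2 (idx + 1)
              (acc ++ List.replicate ((-1 : Int) - (-1)).toNat 0 ++ [if c = "." then (0 : Int) else -1])
            rw [hstep, ih (pvTakeRun false rest).2 hr2 _ _ (by positivity)]
            simp only [pvGroupRuns, hcf, List.flatMap_cons, ← List.append_assoc]
            rw [hsplit]
            congr 1
            simp [pvGVal]

-- ===== B-side: the two passes also emit the grouped runs =====

theorem pvFwdStep_digit (p : Int) (c : String) (h : PySem.Str.strIsdigit c = true) :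
    pvFwdStep p c = pvStep p c := by
  simp only [pvFwdStep, pvStep, h]; rfl

theorem pvFwdStep_nondigit (p : Int) (c : String) (h : PySem.Str.strIsdigit c = false) :
    pvFwdStep p c = 0 := by
  simp only [pvFwdStep, h]; rfl

theorem pvBStep_digit (s : Bool × Int) (e : String × Int)
    (h : PySem.Str.strIsdigit e.1 = true) :
    pvBStep s e = ((true, if s.1 then s.2 else e.2), if s.1 then s.2 else e.2) := by
  simp only [pvBStep, h]; rfl

theorem pvBStep_nondigit (s : Bool × Int) (e : String × Int)
    (h : PySem.Str.strIsdigit e.1 = false) :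
    pvBStep s e = ((false, s.2), if e.1 = "." then (0 : Int) else -1) := by
  simp only [pvBStep, h]; rfl

def pvFwdCarry (l : List String) (p : Int) : Int := l.foldl pvFwdStep p

theorem pvFwd_length (l : List String) (p : Int) : (pvFwd l p).length = l.length := by
  induction l generalizing p with
  | nil => simp [pvFwd]
  | cons c rest ih => simp [pvFwd, ih]

theorem pvFwd_append (a b : List String) (p : Int) :
    pvFwd (a ++ b) p = pvFwd a p ++ pvFwd b (pvFwdCarry a p) := by
  induction a generalizing p with
  | nil => simp [pvFwd, pvFwdCarry]
  | cons c rest ih => simp [pvFwd, ih, pvFwdCarry, List.foldl_cons]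

theorem pvFwd_reset (c : String) (m : List String) (s : Int)
    (hc : PySem.Str.strIsdigit c = false) :
    pvFwd (c :: m) s = pvFwd (c :: m) 0 := by
  simp only [pvFwd]
  rw [pvFwdStep_nondigit s c hc, pvFwdStep_nondigit 0 c hc]

theorem pvFwdCarry_digits (g : List String) (hg : ∀ x ∈ g, PySem.Str.strIsdigit x = true)
    (p : Int) : pvFwdCarry g p = g.foldl pvStep p := by
  induction g generalizing p with
  | nil => simp [pvFwdCarry]
  | cons c rest ih =>
      have hc := hg c (by simp)
      simp only [pvFwdCarry, List.foldl_cons] at *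
      rw [pvFwdStep_digit p c hc]
      exact ih (fun x hx => hg x (by simp [hx])) _

theorem pvFwdCarry_nondigit (g : List String) (hne : g ≠ [])
    (hg : ∀ x ∈ g, PySem.Str.strIsdigit x = false) (p : Int) :
    pvFwdCarry g p = 0 := by
  induction g generalizing p with
  | nil => exact absurd rfl hne
  | cons c rest ih =>
      have hc := hg c (by simp)
      match rest with
      | [] =>
          simp only [pvFwdCarry, List.foldl_cons, List.foldl_nil]
          exact pvFwdStep_nondigit p c hc
      | d :: m =>
          simp only [pvFwdCarry, List.foldl_cons]
          exact ih (by simp) (fun x hx => hg x (by simp [hx])) _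

def pvBwdSt : List (String × Int) → (Bool × Int) → (Bool × Int)
  | [], s => s
  | e :: rest, s => pvBwdSt rest (pvBStep s e).1

theorem pvBwd_append (a b : List (String × Int)) (s : Bool × Int) :
    pvBwd (a ++ b) s = pvBwd a s ++ pvBwd b (pvBwdSt a s) := by
  induction a generalizing s with
  | nil => simp [pvBwd, pvBwdSt]
  | cons e rest ih => simp [pvBwd, pvBwdSt, ih]

theorem pvBwdSt_append (a b : List (String × Int)) (s : Bool × Int) :
    pvBwdSt (a ++ b) s = pvBwdSt b (pvBwdSt a s) := by
  induction a generalizing s with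
  | nil => simp [pvBwdSt]
  | cons e rest ih => simp [pvBwdSt, ih]

theorem pvBwdSt_last (m : List (String × Int)) (c : String) (x : Int) (s : Bool × Int) :
    (pvBwdSt (m ++ [(c, x)]) s).1 = PySem.Str.strIsdigit c := by
  rw [pvBwdSt_append]
  simp only [pvBwdSt, pvBStep]
  split <;> simp_all

theorem pvBwd_digit_tail (z : List (String × Int))
    (hz : ∀ e ∈ z, PySem.Str.strIsdigit e.1 = true) (N : Int) :
    pvBwd z (true, N) = List.replicate z.length N := by
  induction z with
  | nil => simp [pvBwd]
  | cons e rest ih =>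
      have he := hz e (by simp)
      simp only [pvBwd, pvBStep_digit _ _ he, if_true, List.length_cons]
      rw [ih (fun x hx => hz x (by simp [hx]))]
      simp [List.replicate_succ]

theorem pvBwd_nondigit_block (z : List (String × Int))
    (hz : ∀ e ∈ z, PySem.Str.strIsdigit e.1 = false) (s : Bool × Int) :
    pvBwd z s = z.map (fun e => if e.1 = "." then (0 : Int) else -1) := by
  induction z generalizing s with
  | nil => simp [pvBwd]
  | cons e rest ih =>
      have he := hz e (by simp)
      simp only [pvBwd, pvBStep_nondigit _ _ he, List.map_cons]
      rw [ih (fun x hx => hz x (by simp [hx]))]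

theorem pvZip_reverse (l₁ : List String) (l₂ : List Int) (h : l₁.length = l₂.length) :
    l₁.reverse.zip l₂.reverse = (l₁.zip l₂).reverse := by
  induction l₁ generalizing l₂ with
  | nil => simp
  | cons x xs ih =>
      match l₂ with
      | [] => simp at h
      | y :: ys =>
          have hl : xs.length = ys.length := by simpa using h
          simp only [List.reverse_cons]
          rw [List.zip_append (by simp [hl]), ih ys hl]
          simp

theorem pvBwd_digit_block (g : List String) (hne : g ≠ [])
    (hg : ∀ x ∈ g, PySem.Str.strIsdigit x = true) (s : Bool × Int) (hs : s.1 = false) :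
    pvBwd ((g.zip (pvFwd g 0)).reverse) s = List.replicate g.length (g.foldl pvStep 0) := by
  induction g using List.reverseRecOn with
  | nil => exact absurd rfl hne
  | append_singleton init c _ =>
      have hc : PySem.Str.strIsdigit c = true := hg c (by simp)
      have hinit : ∀ x ∈ init, PySem.Str.strIsdigit x = true :=
        fun x hx => hg x (by simp [hx])
      rw [pvFwd_append]
      have hN : pvFwd [c] (pvFwdCarry init 0) = [(init ++ [c]).foldl pvStep 0] := by
        simp only [pvFwd, pvFwdStep, hc, if_pos, List.foldl_append, List.foldl_cons,
          List.foldl_nil]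
        rw [pvFwdCarry_digits init hinit]
        simp [pvStep]
      rw [hN, List.zip_append (by simp [pvFwd_length])]
      set N := (init ++ [c]).foldl pvStep 0 with hNdef
      have hz1 : ([c].zip [N]) = [(c, N)] := rfl
      rw [hz1, List.reverse_append]
      simp only [List.reverse_cons, List.reverse_nil, List.nil_append, List.singleton_append]
      simp only [pvBwd, pvBStep_digit _ (c, N) hc, hs]
      simp only [Bool.false_eq_true, if_false]
      rw [pvBwd_digit_tail _ (fun e he => by
            have := List.of_mem_zip (List.mem_reverse.mp he)
            exact hinit e.1 this.1)]
      simp [List.length_reverse, List.length_zip, pvFwd_length, List.replicate_succ]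

theorem pvBwd_groups :
    ∀ (n : Nat) (l : List String), l.length ≤ n →
      pvBwd ((l.zip (pvFwd l 0)).reverse) (false, 0) =
        ((pvGroupRuns l).flatMap pvGVal).reverse := by
  intro n
  induction n with
  | zero =>
      intro l hl
      have : l = [] := List.length_eq_zero_iff.mp (Nat.le_zero.mp hl)
      subst this
      simp [pvBwd, pvGroupRuns]
  | succ n ih =>
      intro l hl
      match l with
      | [] => simp [pvBwd, pvGroupRuns]
      | c :: rest =>
          have hrest : rest.length ≤ n := by simpa using hl
          set k := PySem.Str.strIsdigit c with hk
          set g : List String := c :: (pvTakeRun k rest).1 with hgdef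
          set r : List String := (pvTakeRun k rest).2 with hrdef
          have hgr : g ++ r = c :: rest := by
            simp only [hgdef, hrdef, List.cons_append]
            rw [pvTakeRun_append]
          have hgmem : ∀ x ∈ g, PySem.Str.strIsdigit x = k := by
            intro x hx
            rcases List.mem_cons.mp hx with h | h
            · rw [h, hk]
            · exact pvTakeRun_mem k rest x h
          have hrhead : ∀ d r', r = d :: r' → ¬ PySem.Str.strIsdigit d = k :=
            fun d r' h => pvTakeRun_head k rest d r' h
          have hr2 : r.length ≤ n := le_trans (pvTakeRun_snd_length k rest) hrest
          have hvr : pvFwd r (pvFwdCarry g 0) = pvFwd r 0 := by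
            match hrc : r with
            | [] => simp [pvFwd]
            | d :: r' =>
                cases hkv : k with
                | true =>
                    have hd : PySem.Str.strIsdigit d = false := by
                      have := hrhead d r' rfl
                      rw [hkv] at this
                      simpa using this
                    exact pvFwd_reset d r' _ hd
                | false =>
                    rw [pvFwdCarry_nondigit g (by simp [hgdef])
                        (fun x hx => by rw [hgmem x hx, hkv]) 0]
          have hsplit : (c :: rest).zip (pvFwd (c :: rest) 0) =
              g.zip (pvFwd g 0) ++ r.zip (pvFwd r 0) := by
            rw [← hgr, pvFwd_append, hvr, List.zip_append (by simp [pvFwd_length])]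
          rw [hsplit, List.reverse_append, pvBwd_append, ih r hr2]
          have hgroups : pvGroupRuns (c :: rest) = (k, g) :: pvGroupRuns r := by
            rw [pvGroupRuns]
          rw [hgroups, List.flatMap_cons, List.reverse_append]
          congr 1
          -- remaining: the g-block with the entry state after processing r's reversed zip
          have hstate1 : (pvBwdSt ((r.zip (pvFwd r 0)).reverse) (false, 0)).1 = false ∨ k = false := by
            cases hkv : k with
            | false => exact Or.inr rfl
            | true =>
                left
                match hrc : r with
                | [] => simp [pvBwdSt]
                | d :: r' =>
                    have hd : PySem.Str.strIsdigit d = false := by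
                      have := hrhead d r' rfl
                      rw [hkv] at this
                      simpa using this
                    have : pvFwd (d :: r') 0 = pvFwdStep 0 d :: pvFwd r' (pvFwdStep 0 d) := rfl
                    rw [this]
                    simp only [List.zip_cons_cons, List.reverse_cons]
                    rw [pvBwdSt_last]
                    exact hd
          cases hkv : k with
          | true =>
              have hs1 : (pvBwdSt ((r.zip (pvFwd r 0)).reverse) (false, 0)).1 = false := by
                rcases hstate1 with h | h
                · exact h
                · rw [hkv] at h; exact absurd h (by simp)
              rw [pvBwd_digit_block g (by simp [hgdef])
                  (fun x hx => by rw [hgmem x hx, hkv]) _ hs1]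
              simp [pvGVal, List.reverse_replicate]
          | false =>
              rw [pvBwd_nondigit_block _ (fun e he => by
                    have := List.of_mem_zip (List.mem_reverse.mp he)
                    rw [hgmem e.1 this.1, hkv])]
              simp only [pvGVal, Bool.false_eq_true, if_false]
              rw [List.map_reverse]
              congr 1
              have : (g.zip (pvFwd g 0)).map (fun e => if e.1 = "." then (0 : Int) else -1)
                   = (g.zip (pvFwd g 0)).map ((fun c => if c = "." then (0 : Int) else -1) ∘ Prod.fst) := rfl
              rw [this, ← List.map_map, List.map_fst_zip]
              simp [pvFwd_length]

theorem pvAlt_eq (input : List String) :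
    BuildNumbers_alt input = (pvGroupRuns input).flatMap pvGVal := by
  have h : BuildNumbers_alt input
      = (pvBwd (input.reverse.zip (pvFwd input 0).reverse) (false, 0)).reverse := rfl
  rw [h, pvZip_reverse input (pvFwd input 0) (by simp [pvFwd_length]),
      pvBwd_groups input.length input le_rfl]
  simp

-- ===== VERDICT (by name: the statement is the Claim_ definition above) =====
theorem BuildNumbers_spec : Claim_equal_BuildNumbers := by
  intro input _
  unfold Spec_BuildNumbers
  rw [pvAlt_eq]
  simpa using pvLoopA_groups input.length input le_rfl 0 [] le_rfl
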